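-- pv_equiv track=rewrite | github.com/Harleen2505/Skillrace-internship-task | Task 1B flame game.py | calculate_flame_count
-- ===== SOURCE A (Python) =====
-- def calculate_flame_count(name1, name2):
--     name1 = name1.lower().replace(" ", "")
--     name2 = name2.lower().replace(" ", "")
--     count = 0
--     for char in name1:
--         if char in name2:
--             name2 = name2.replace(char, "", 1)
--         else:
--             count += 1
--     return count + len(name2)
-- ===== SOURCE B (Python) =====
-- def calculate_flame_count(name1, name2):
--     a = sorted(name1.lower().replace(" ", ""))
--     b = sorted(name2.lower().replace(" ", ""))
--     i = j = count = 0
--     while i < len(a) and j < len(b):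
--         if a[i] == b[j]:
--             i += 1
--             j += 1
--         elif a[i] < b[j]:
--             i += 1
--             count += 1
--         else:
--             j += 1
--             count += 1
--     return count + (len(a) - i) + (len(b) - j)
-- ===== Notes on version B (the rewrite author's own statement) =====
-- stated objective: faster
-- what changed: Replaces the per-character membership scan plus replace-one-occurrence rebuild of name2 with sorting both cleaned names and a single two-pointer merge that counts mismatches.
import Mathlib
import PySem

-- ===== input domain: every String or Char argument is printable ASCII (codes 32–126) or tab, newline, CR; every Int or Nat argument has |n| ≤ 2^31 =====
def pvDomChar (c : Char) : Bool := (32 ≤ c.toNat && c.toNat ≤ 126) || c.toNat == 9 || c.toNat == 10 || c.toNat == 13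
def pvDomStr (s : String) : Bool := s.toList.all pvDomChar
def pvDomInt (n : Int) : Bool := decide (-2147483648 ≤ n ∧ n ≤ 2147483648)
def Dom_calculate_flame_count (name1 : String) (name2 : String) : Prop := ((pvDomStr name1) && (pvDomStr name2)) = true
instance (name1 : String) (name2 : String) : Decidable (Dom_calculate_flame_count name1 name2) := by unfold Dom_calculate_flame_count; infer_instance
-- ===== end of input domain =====

-- B replaces A's per-character scan-and-delete over name2 with sort + one two-pointer merge (objective: faster).

-- ===== PORT A =====
-- A's loop: for char in name1: if char in name2 (length-1 substring containment = char
-- membership, exact) then name2 = name2.replace(char, "", 1) (removing the first occurrence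
-- of a single character = List.erase, exact) else count += 1;  finally count + len(name2).
def pvALoop (l1 l2 : List Char) (count : Int) : Int :=
  match l1 with
  | [] => count + l2.length
  | c :: t => if c ∈ l2 then pvALoop t (l2.erase c) count else pvALoop t l2 (count + 1)

def calculate_flame_count (name1 : String) (name2 : String) : Int :=
  let l1 := PySem.Chars.replace (PySem.Chars.lower name1.toList) [' '] []
  let l2 := PySem.Chars.replace (PySem.Chars.lower name2.toList) [' '] []
  pvALoop l1 l2 0

-- ===== PORT B =====
-- B's while loop: two pointers over the two sorted lists, counting mismatches; the tail
-- cases are the '(len(a) - i) + (len(b) - j)' leftovers.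
def pvMerge (a b : List Char) (count : Int) : Int :=
  match a, b with
  | [], b => count + b.length
  | a, [] => count + a.length
  | x :: ta, y :: tb =>
      if x = y then pvMerge ta tb count
      else if x < y then pvMerge ta (y :: tb) (count + 1)
      else pvMerge (x :: ta) tb (count + 1)
termination_by a.length + b.length
decreasing_by all_goals (simp; try omega)

def calculate_flame_count_alt (name1 : String) (name2 : String) : Int :=
  let a := PySem.List.sorted (PySem.Chars.replace (PySem.Chars.lower name1.toList) [' '] []) (fun x => x) false
  let b := PySem.List.sorted (PySem.Chars.replace (PySem.Chars.lower name2.toList) [' '] []) (fun x => x) false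
  pvMerge a b 0

-- ===== PRECONDITION & SPEC =====
def Spec_calculate_flame_count (name1 : String) (name2 : String) (out : Int) : Prop := out = calculate_flame_count_alt name1 name2
instance (name1 : String) (name2 : String) (out : Int) : Decidable (Spec_calculate_flame_count name1 name2 out) := by unfold Spec_calculate_flame_count; infer_instance

-- ===== CLAIM (what is proved, stated in full; the proofs are below) =====
def Claim_equal_calculate_flame_count : Prop := ∀ (name1 : String) (name2 : String), Dom_calculate_flame_count name1 name2 → Spec_calculate_flame_count name1 name2 (calculate_flame_count name1 name2)

-- ===== LEMMAS AND PROOFS =====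

-- Both programs compute count + |l1| + |l2| - 2·|l1 ∩ l2| (multiset intersection).
theorem pvALoop_eq (l1 : List Char) : ∀ (l2 : List Char) (count : Int),
    pvALoop l1 l2 count
      = count + l1.length + l2.length - 2 * ((l1 : Multiset Char) ∩ (l2 : Multiset Char)).card := by
  induction l1 with
  | nil =>
    intro l2 count
    simp [pvALoop]
  | cons c t ih =>
    intro l2 count
    by_cases h : c ∈ l2
    · have hstep : ((c :: t : List Char) : Multiset Char) ∩ (l2 : Multiset Char)
          = c ::ₘ ((t : Multiset Char) ∩ ((l2.erase c : List Char) : Multiset Char)) := by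
        simpa [Multiset.coe_erase] using
          Multiset.cons_inter_of_pos (t := (l2 : Multiset Char)) (a := c) (t : Multiset Char) (by simpa using h)
      have hlen : (l2.erase c).length + 1 = l2.length := by
        simpa using List.length_erase_add_one h
      simp only [pvALoop, if_pos h, ih, hstep, Multiset.card_cons, List.length_cons]
      push_cast
      omega
    · have hstep : ((c :: t : List Char) : Multiset Char) ∩ (l2 : Multiset Char)
          = (t : Multiset Char) ∩ (l2 : Multiset Char) :=
        Multiset.cons_inter_of_neg (t := (l2 : Multiset Char)) (a := c) (t : Multiset Char) (by simpa using h)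
      simp only [pvALoop, if_neg h, ih, hstep, List.length_cons]
      push_cast
      omega

theorem pvMerge_eq (a : List Char) : ∀ (b : List Char) (count : Int),
    a.Pairwise (· ≤ ·) → b.Pairwise (· ≤ ·) →
    pvMerge a b count
      = count + a.length + b.length - 2 * ((a : Multiset Char) ∩ (b : Multiset Char)).card := by
  induction a with
  | nil =>
    intro b count _ _
    simp [pvMerge]
  | cons x ta iha =>
    intro b
    induction b with
    | nil =>
      intro count _ _
      simp [pvMerge]
    | cons y tb ihb =>
      intro count ha hb
      by_cases hxy : x = y
      · subst hxy
        have hstep : ((x :: ta : List Char) : Multiset Char) ∩ ((x :: tb : List Char) : Multiset Char)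
            = x ::ₘ ((ta : Multiset Char) ∩ ((tb : List Char) : Multiset Char)) := by
          simpa using
            Multiset.cons_inter_of_pos (t := ((x :: tb : List Char) : Multiset Char)) (a := x)
              (ta : Multiset Char) (by simp)
        simp only [pvMerge, hstep, Multiset.card_cons, List.length_cons,
          iha tb count ha.of_cons hb.of_cons]
        push_cast
        omega
      · by_cases hlt : x < y
        · have hnot : x ∉ ((y :: tb : List Char) : Multiset Char) := by
            intro hmem
            have hmem2 : x ∈ (y :: tb : List Char) := by simpa using hmem
            rcases List.mem_cons.mp hmem2 with heq | hmem3
            · exact hxy heq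
            · exact absurd (List.rel_of_pairwise_cons hb hmem3) (not_le.mpr hlt)
          have hstep : ((x :: ta : List Char) : Multiset Char) ∩ ((y :: tb : List Char) : Multiset Char)
              = (ta : Multiset Char) ∩ ((y :: tb : List Char) : Multiset Char) :=
            Multiset.cons_inter_of_neg (t := ((y :: tb : List Char) : Multiset Char)) (a := x)
              (ta : Multiset Char) hnot
          simp only [pvMerge, if_neg hxy, if_pos hlt, hstep, List.length_cons,
            iha (y :: tb) (count + 1) ha.of_cons hb]
          push_cast
          omega
        · have hyx : y < x := lt_of_le_of_ne (not_lt.mp hlt) (fun h => hxy h.symm)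
          have hnot : y ∉ ((x :: ta : List Char) : Multiset Char) := by
            intro hmem
            have hmem2 : y ∈ (x :: ta : List Char) := by simpa using hmem
            rcases List.mem_cons.mp hmem2 with heq | hmem3
            · exact hxy heq.symm
            · exact absurd (List.rel_of_pairwise_cons ha hmem3) (not_le.mpr hyx)
          have hstep : ((x :: ta : List Char) : Multiset Char) ∩ ((y :: tb : List Char) : Multiset Char)
              = ((x :: ta : List Char) : Multiset Char) ∩ ((tb : List Char) : Multiset Char) := by
            rw [Multiset.inter_comm,
              show ((y :: tb : List Char) : Multiset Char) = y ::ₘ (tb : Multiset Char) from rfl,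
              Multiset.cons_inter_of_neg (t := ((x :: ta : List Char) : Multiset Char)) (a := y)
                (tb : Multiset Char) hnot,
              Multiset.inter_comm]
          simp only [pvMerge, if_neg hxy, if_neg hlt, hstep, List.length_cons,
            ihb (count + 1) ha hb.of_cons]
          push_cast
          omega

-- ===== VERDICT (by name: the statement is the Claim_ definition above) =====
theorem calculate_flame_count_spec : Claim_equal_calculate_flame_count := by
  intro name1 name2 _
  unfold Spec_calculate_flame_count calculate_flame_count calculate_flame_count_alt
  set l1 := PySem.Chars.replace (PySem.Chars.lower name1.toList) [' '] [] with hl1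
  set l2 := PySem.Chars.replace (PySem.Chars.lower name2.toList) [' '] [] with hl2
  set a := PySem.List.sorted l1 (fun x => x) false with ha
  set b := PySem.List.sorted l2 (fun x => x) false with hb
  have hpa : (a : Multiset Char) = (l1 : Multiset Char) :=
    Multiset.coe_eq_coe.mpr (PySem.List.sorted_perm l1 (fun x => x) false)
  have hpb : (b : Multiset Char) = (l2 : Multiset Char) :=
    Multiset.coe_eq_coe.mpr (PySem.List.sorted_perm l2 (fun x => x) false)
  have hla : a.length = l1.length := (PySem.List.sorted_perm l1 (fun x => x) false).length_eq
  have hlb : b.length = l2.length := (PySem.List.sorted_perm l2 (fun x => x) false).length_eq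
  have hsa : a.Pairwise (· ≤ ·) := by
    simpa using PySem.List.sorted_pairwise (xs := l1) (key := fun x => x)
  have hsb : b.Pairwise (· ≤ ·) := by
    simpa using PySem.List.sorted_pairwise (xs := l2) (key := fun x => x)
  rw [pvALoop_eq, pvMerge_eq a b 0 hsa hsb, hpa, hpb, hla, hlb]
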